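-- pv_equiv track=rewrite | github.com/waelbhy/MarvelDataViz | Final_version/final_graph.py | count_per_year
-- ===== SOURCE A (Python) =====
-- def count_per_year(liste):
--
--     #variable qui contiendra le cumul de comics au fil des annees
--     cumul=0
--     #tri par ordre croissant de nos annees
--     liste=sorted(liste)
--     tab_comic=[]
--     #on demarre notre animation a partir de l'annee 1920
--     tab_comic.append([1920,0])
--     tab_year=[]
--     #pour chaque annee dans la liste
--     for valeur in liste:
--         tab_temp=[]
--         if(valeur not in tab_year):
--             #augmentation du cumul
--             cumul += liste.count(valeur)
--             #ajout de l'annee dans le tableau d'annees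
--             tab_year.append(valeur)
--             tab_temp.append(valeur)
--             #ajout du cumul pour cet annee
--             tab_temp.append(cumul)
--             #retour de notre structure finale
--             tab_comic.append(tab_temp)
--
--     return(tab_comic)
-- ===== SOURCE B (Python) =====
-- def count_per_year(liste):
--     s = sorted(liste)
--     res = [[1920, 0]]
--     n = len(s)
--     i = 0
--     while i < n:
--         # advance j past the run of equal values starting at i
--         j = i + 1
--         while j < n and s[j] == s[i]:
--             j += 1
--         # in the sorted list, the cumulative number of comics up to this
--         # year IS the index just past its run
--         res.append([s[i], j])
--         i = j
--     return res
-- ===== Notes on version B (the rewrite author's own statement) =====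
-- stated objective: faster
-- what changed: Instead of maintaining a running cumulative sum with membership tests and repeated liste.count scans, B does a two-pointer run scan over the sorted list: the cumulative count for each year is simply the index just past its run, so no counting and no accumulator are needed.
import Mathlib
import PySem

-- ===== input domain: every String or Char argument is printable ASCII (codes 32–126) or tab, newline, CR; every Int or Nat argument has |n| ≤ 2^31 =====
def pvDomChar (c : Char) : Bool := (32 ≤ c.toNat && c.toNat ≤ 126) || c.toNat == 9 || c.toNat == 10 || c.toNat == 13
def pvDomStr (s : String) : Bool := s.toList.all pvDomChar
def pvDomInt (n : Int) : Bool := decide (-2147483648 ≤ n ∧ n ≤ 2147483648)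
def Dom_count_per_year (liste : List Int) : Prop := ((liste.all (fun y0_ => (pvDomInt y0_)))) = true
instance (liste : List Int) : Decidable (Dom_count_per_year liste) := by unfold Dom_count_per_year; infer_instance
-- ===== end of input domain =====

-- B replaces A's membership-list + repeated list.count scans by a two-pointer run scan over the
-- sorted list, where the cumulative count of a year is the index just past its run (objective: faster).

-- ===== PORT A =====
-- literal port: sort, then for each value not yet in tab_year, cumul += liste.count(valeur)
-- (liste is rebound to the sorted list in A, so count is taken on the sorted list) and append.
def count_per_year (liste : List Int) : List (List Int) :=
  (((PySem.List.sorted liste (fun x => x)).foldl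
      (fun (st : Int × List (List Int) × List Int) valeur =>
        if valeur ∈ st.2.2 then st
        else
          (st.1 + (PySem.List.count (PySem.List.sorted liste (fun x => x)) valeur : Int),
           st.2.1 ++ [[valeur, st.1 + (PySem.List.count (PySem.List.sorted liste (fun x => x)) valeur : Int)]],
           st.2.2 ++ [valeur]))
      (0, [[1920, 0]], []))).2.1

-- ===== PORT B =====
-- literal port of Source B: s = sorted(liste); two nested while loops over indices; the inner loop
-- (pvInner) advances j past the run of values equal to s[i]; the outer loop (pvOuter) appends
-- [s[i], j] and jumps i to j.  s[i]/s[j] are in range under the loop guards; ported as pyGetD.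
def pvInner (s : List Int) (i n j : Int) : Int :=
  if h : j < n ∧ PySem.List.pyGetD s j 0 = PySem.List.pyGetD s i 0 then
    pvInner s i n (j + 1)
  else j
termination_by (n - j).toNat
decreasing_by omega

-- used only by pvOuter's decreasing_by (termination of Source B's outer while)
theorem pvInner_ge (s : List Int) (i n j : Int) : j ≤ pvInner s i n j := by
  fun_induction pvInner s i n j with
  | case1 j h ih => omega
  | case2 j h => omega

def pvOuter (s : List Int) (n : Int) (i : Int) (res : List (List Int)) : List (List Int) :=
  if _h : i < n then
    let j := pvInner s i n (i + 1)
    pvOuter s n j (res ++ [[PySem.List.pyGetD s i 0, j]])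
  else res
termination_by (n - i).toNat
decreasing_by have := pvInner_ge s i n (i + 1); omega

def count_per_year_alt (liste : List Int) : List (List Int) :=
  pvOuter (PySem.List.sorted liste (fun x => x))
    ((PySem.List.sorted liste (fun x => x)).length : Int) 0 [[1920, 0]]

-- ===== PRECONDITION & SPEC =====
def Spec_count_per_year (liste : List Int) (out : List (List Int)) : Prop := out = count_per_year_alt liste
instance (liste : List Int) (out : List (List Int)) : Decidable (Spec_count_per_year liste out) := by unfold Spec_count_per_year; infer_instance

-- ===== CLAIM (what is proved, stated in full; the proofs are below) =====
def Claim_equal_count_per_year : Prop := ∀ (liste : List Int), Dom_count_per_year liste → Spec_count_per_year liste (count_per_year liste)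

-- ===== LEMMAS AND PROOFS =====

-- the common shape both programs compute: the run decomposition of the sorted list,
-- emitting [run value, cumulative index past the run]
def runSpec : List Int → Int → List (List Int)
  | [], _ => []
  | x :: xs, c =>
      [x, c + 1 + ((xs.takeWhile (fun y => y == x)).length : Int)] ::
      runSpec (xs.dropWhile (fun y => y == x)) (c + 1 + ((xs.takeWhile (fun y => y == x)).length : Int))
termination_by l => l.length
decreasing_by exact Nat.lt_succ_of_le (xs.length_dropWhile_le _)

theorem pv_dropWhile_eq_drop (p : Int → Bool) (l : List Int) :
    l.dropWhile p = l.drop (l.takeWhile p).length := by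
  conv_lhs => rw [show l.dropWhile p = (l.takeWhile p ++ l.dropWhile p).drop (l.takeWhile p).length
    from List.drop_left.symm, List.takeWhile_append_dropWhile]

-- ---- B side ----

theorem pvInner_spec (s : List Int) (i : Nat) (x : Int) (hi : i < s.length) (hx : s[i] = x) :
    ∀ (j : Nat), pvInner s (i : Int) (s.length : Int) (j : Int)
      = (j : Int) + (((s.drop j).takeWhile (fun y => y == x)).length : Int) := by
  intro j
  generalize hm : s.length - j = m
  induction m generalizing j with
  | zero =>
    rw [pvInner]
    rw [List.drop_eq_nil_of_le (by omega)]
    simp only [List.takeWhile_nil, List.length_nil]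
    rw [dif_neg (by omega)]
    simp
  | succ m ih =>
    have hj : j < s.length := by omega
    rw [pvInner]
    rw [List.drop_eq_getElem_cons hj]
    have hget : PySem.List.pyGetD s (j : Int) 0 = s[j] := by
      rw [PySem.List.pyGetD_natCast]
      exact List.getD_eq_getElem s 0 hj
    have hgeti : PySem.List.pyGetD s (i : Int) 0 = x := by
      rw [PySem.List.pyGetD_natCast, List.getD_eq_getElem s 0 hi, hx]
    by_cases hv : s[j] = x
    · rw [dif_pos ⟨by exact_mod_cast hj, by rw [hget, hgeti, hv]⟩]
      have hc : ((j : Int) + 1) = ((j + 1 : Nat) : Int) := by push_cast; ring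
      rw [hc, ih (j + 1) (by omega)]
      simp only [List.takeWhile_cons, hv, beq_self_eq_true, if_true, List.length_cons]
      push_cast; omega
    · rw [dif_neg (by rw [hget, hgeti]; exact fun hc => hv hc.2)]
      simp only [List.takeWhile_cons]
      rw [if_neg (by simpa using hv)]
      simp

theorem pvOuter_spec (s : List Int) :
    ∀ (m i : Nat), s.length - i ≤ m → i ≤ s.length → ∀ (res : List (List Int)),
      pvOuter s (s.length : Int) (i : Int) res = res ++ runSpec (s.drop i) (i : Int) := by
  intro m
  induction m with
  | zero =>
    intro i hm hile res
    have hieq : i = s.length := by omega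
    rw [pvOuter, dif_neg (by omega)]
    rw [hieq, List.drop_length]
    simp [runSpec]
  | succ m ih =>
    intro i hm hile res
    by_cases hi : i < s.length
    · rw [pvOuter, dif_pos (by exact_mod_cast hi)]
      have hcast : ((i : Int) + 1) = ((i + 1 : Nat) : Int) := by push_cast; ring
      have hinner := pvInner_spec s i s[i] hi rfl (i + 1)
      rw [hcast, hinner]
      have htwlen : ((s.drop (i + 1)).takeWhile (fun y => y == s[i])).length ≤ s.length - (i + 1) := by
        have h1 := List.Sublist.length_le
          (List.takeWhile_sublist (p := fun y => y == s[i]) (l := s.drop (i + 1)))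
        simpa [List.length_drop] using h1
      have hget : PySem.List.pyGetD s (i : Int) 0 = s[i] := by
        rw [PySem.List.pyGetD_natCast]
        exact List.getD_eq_getElem s 0 hi
      have hc2 : ((i + 1 : Nat) : Int) + (((s.drop (i + 1)).takeWhile (fun y => y == s[i])).length : Int)
          = ((i + 1 + ((s.drop (i + 1)).takeWhile (fun y => y == s[i])).length : Nat) : Int) := by
        push_cast; ring
      rw [hc2, hget,
        ih (i + 1 + ((s.drop (i + 1)).takeWhile (fun y => y == s[i])).length) (by omega) (by omega)]
      rw [List.drop_eq_getElem_cons hi, runSpec]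
      have hdrop : (s.drop (i + 1)).dropWhile (fun y => y == s[i])
          = s.drop (i + 1 + ((s.drop (i + 1)).takeWhile (fun y => y == s[i])).length) := by
        rw [pv_dropWhile_eq_drop, List.drop_drop]
      rw [hdrop]
      have hc3 : ((i + 1 + ((s.drop (i + 1)).takeWhile (fun y => y == s[i])).length : Nat) : Int)
          = (i : Int) + 1 + (((s.drop (i + 1)).takeWhile (fun y => y == s[i])).length : Int) := by
        push_cast; ring
      rw [hc3]
      simp [List.append_assoc]
    · have hieq : i = s.length := by omega
      rw [pvOuter, dif_neg (by omega)]
      rw [hieq, List.drop_length]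
      simp [runSpec]

-- ---- A side ----

-- the values A's loop actually processes: first occurrences of l not already in seen, in order
def pvFirsts (seen : List Int) : List Int → List Int
  | [] => []
  | x :: xs => if x ∈ seen then pvFirsts seen xs else x :: pvFirsts (seen ++ [x]) xs

-- A's membership-guarded fold over l equals the plain cumulative fold over pvFirsts seen l
theorem pvFoldA (s : List Int) :
    ∀ (l : List Int) (seen : List Int) (c : Int) (t : List (List Int)),
      l.foldl
        (fun (st : Int × List (List Int) × List Int) valeur =>
          if valeur ∈ st.2.2 then st
          else
            let cumul' := st.1 + (PySem.List.count s valeur : Int)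
            (cumul', st.2.1 ++ [[valeur, cumul']], st.2.2 ++ [valeur]))
        (c, t, seen)
      = (((pvFirsts seen l).foldl
            (fun (st : Int × List (List Int)) v =>
              (st.1 + (PySem.List.count s v : Int), st.2 ++ [[v, st.1 + (PySem.List.count s v : Int)]]))
            (c, t)).1,
         ((pvFirsts seen l).foldl
            (fun (st : Int × List (List Int)) v =>
              (st.1 + (PySem.List.count s v : Int), st.2 ++ [[v, st.1 + (PySem.List.count s v : Int)]]))
            (c, t)).2,
         seen ++ pvFirsts seen l) := by
  intro l
  induction l with
  | nil => intro seen c t; simp [pvFirsts]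
  | cons x xs ih =>
    intro seen c t
    simp only [List.foldl_cons, pvFirsts]
    by_cases hx : x ∈ seen
    · rw [if_pos hx, if_pos hx, ih]
    · rw [if_neg hx, if_neg hx]
      simp only [List.foldl_cons]
      rw [ih]
      simp

-- skipping already-seen elements
theorem pvFirsts_skip : ∀ (w r seen : List Int), (∀ a ∈ w, a ∈ seen) →
    pvFirsts seen (w ++ r) = pvFirsts seen r := by
  intro w
  induction w with
  | nil => intro r seen _; rfl
  | cons a as ih =>
    intro r seen h
    simp only [List.cons_append, pvFirsts, if_pos (h a (by simp))]
    exact ih r seen (fun b hb => h b (by simp [hb]))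

-- seen lists agreeing on the elements of l give the same pvFirsts
theorem pvFirsts_seen_congr : ∀ (l s1 s2 : List Int), (∀ a ∈ l, (a ∈ s1 ↔ a ∈ s2)) →
    pvFirsts s1 l = pvFirsts s2 l := by
  intro l
  induction l with
  | nil => intro _ _ _; rfl
  | cons a as ih =>
    intro s1 s2 h
    simp only [pvFirsts]
    have ha := h a (by simp)
    by_cases h1 : a ∈ s1
    · rw [if_pos h1, if_pos (ha.1 h1)]
      exact ih s1 s2 (fun b hb => h b (by simp [hb]))
    · rw [if_neg h1, if_neg (fun hc => h1 (ha.2 hc))]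
      congr 1
      apply ih
      intro b hb
      simp only [List.mem_append, List.mem_singleton]
      exact or_congr (h b (by simp [hb])) Iff.rfl

-- a sorted list's dropWhile (== x) contains no x, when x is a lower bound
theorem pv_not_mem_dropWhile (x : Int) : ∀ (xs : List Int), xs.Pairwise (· ≤ ·) →
    (∀ a ∈ xs, x ≤ a) → x ∉ xs.dropWhile (fun y => y == x) := by
  intro xs
  induction xs with
  | nil => intro _ _; simp
  | cons a as ih =>
    intro hp hlb
    by_cases ha : a = x
    · rw [List.dropWhile_cons, if_pos (by simp [ha])]
      exact ih (List.pairwise_cons.1 hp).2 (fun b hb => hlb b (by simp [hb]))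
    · rw [List.dropWhile_cons, if_neg (by simp [ha])]
      intro hc
      rcases List.mem_cons.1 hc with rfl | hc
      · exact ha rfl
      · have h1 : a ≤ x := (List.pairwise_cons.1 hp).1 x hc
        have h2 : x ≤ a := hlb a (by simp)
        exact ha (le_antisymm h1 h2)

-- the fold over first occurrences of a sorted list is runSpec, when counts are taken in a list
-- agreeing with it on its members
theorem pvFoldFirsts (s0 : List Int) :
    ∀ (m : Nat) (s : List Int), s.length ≤ m → s.Pairwise (· ≤ ·) →
      (∀ v ∈ s, s0.count v = s.count v) →
      ∀ (c : Int) (t : List (List Int)),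
        ((pvFirsts [] s).foldl
            (fun (st : Int × List (List Int)) v =>
              (st.1 + (PySem.List.count s0 v : Int), st.2 ++ [[v, st.1 + (PySem.List.count s0 v : Int)]]))
            (c, t))
        = (c + (s.length : Int), t ++ runSpec s c) := by
  intro m
  induction m with
  | zero =>
    intro s hlen _ _ c t
    have : s = [] := List.length_eq_zero_iff.1 (by omega)
    subst this
    simp [pvFirsts, runSpec]
  | succ m ih =>
    intro s hlen hp hcnt c t
    match s, hp with
    | [], _ => simp [pvFirsts, runSpec]
    | x :: xs, hp =>
      have hxs : xs.Pairwise (· ≤ ·) := (List.pairwise_cons.1 hp).2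
      have hxle : ∀ a ∈ xs, x ≤ a := (List.pairwise_cons.1 hp).1
      have hw : ∀ a ∈ xs.takeWhile (fun y => y == x), a = x := by
        intro a haw
        simpa using List.mem_takeWhile_imp haw
      have hxr : x ∉ xs.dropWhile (fun y => y == x) := pv_not_mem_dropWhile x xs hxs hxle
      -- pvFirsts [] (x :: xs) = x :: pvFirsts [] r
      have hfirsts : pvFirsts [] (x :: xs) = x :: pvFirsts [] (xs.dropWhile (fun y => y == x)) := by
        show (if x ∈ ([] : List Int) then _ else x :: pvFirsts ([] ++ [x]) xs) = _
        rw [if_neg (by simp)]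
        congr 1
        conv_lhs => rw [← List.takeWhile_append_dropWhile (p := fun y => y == x) (l := xs)]
        rw [pvFirsts_skip _ _ _ (by intro a haw; simp [hw a haw])]
        apply pvFirsts_seen_congr
        intro a haw
        constructor
        · intro hc
          exact absurd haw (by simpa [List.mem_singleton.1 (by simpa using hc)] using hxr)
        · intro hc; exact absurd hc (by simp)
      -- counts
      have hwcount : (xs.takeWhile (fun y => y == x)).count x
          = (xs.takeWhile (fun y => y == x)).length :=
        List.count_eq_length.2 (fun b hb => (hw b hb).symm)
      have hrcount : (xs.dropWhile (fun y => y == x)).count x = 0 :=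
        List.count_eq_zero.2 hxr
      have hcntx : s0.count x = (xs.takeWhile (fun y => y == x)).length + 1 := by
        rw [hcnt x (by simp)]
        conv_lhs => rw [List.count_cons_self,
          ← List.takeWhile_append_dropWhile (p := fun y => y == x) (l := xs)]
        rw [List.count_append, hwcount, hrcount]
      have hlensplit : xs.length
          = (xs.takeWhile (fun y => y == x)).length + (xs.dropWhile (fun y => y == x)).length := by
        conv_lhs => rw [← List.takeWhile_append_dropWhile (p := fun y => y == x) (l := xs)]
        rw [List.length_append]
      -- IH preconditions for r
      have hrsub : (xs.dropWhile (fun y => y == x)).Sublist xs := List.dropWhile_sublist _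
      have hrp : (xs.dropWhile (fun y => y == x)).Pairwise (· ≤ ·) := hxs.sublist hrsub
      have hrcnt : ∀ v ∈ xs.dropWhile (fun y => y == x),
          s0.count v = (xs.dropWhile (fun y => y == x)).count v := by
        intro v hv
        have hvx : v ≠ x := fun hc => hxr (hc ▸ hv)
        rw [hcnt v (by simp [hrsub.mem hv])]
        have hcx : List.count v (x :: xs) = List.count v xs := by
          simp [Ne.symm hvx]
        rw [hcx]
        conv_lhs => rw [← List.takeWhile_append_dropWhile (p := fun y => y == x) (l := xs)]
        rw [List.count_append,
          List.count_eq_zero.2 (fun hc => hvx (hw v hc)), Nat.zero_add]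
      have hrlen : (xs.dropWhile (fun y => y == x)).length ≤ m := by
        have := xs.length_dropWhile_le (fun y => y == x)
        simp only [List.length_cons] at hlen
        omega
      -- assemble
      rw [hfirsts, List.foldl_cons, PySem.List.count_eq, hcntx,
        ih _ hrlen hrp hrcnt]
      rw [runSpec]
      have hc1 : c + (((xs.takeWhile (fun y => y == x)).length + 1 : Nat) : Int)
          = c + 1 + ((xs.takeWhile (fun y => y == x)).length : Int) := by push_cast; ring
      rw [hc1, Prod.mk.injEq]
      refine ⟨?_, ?_⟩
      · simp only [List.length_cons, hlensplit]; push_cast; ring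
      · simp [List.append_assoc]

-- ===== VERDICT (by name: the statement is the Claim_ definition above) =====
theorem count_per_year_spec : Claim_equal_count_per_year := by
  intro liste _
  unfold Spec_count_per_year count_per_year count_per_year_alt
  rw [pvFoldA]
  rw [pvFoldFirsts (PySem.List.sorted liste (fun x => x))
        (PySem.List.sorted liste (fun x => x)).length
        (PySem.List.sorted liste (fun x => x)) le_rfl
        (by simpa using PySem.List.sorted_pairwise liste (fun x => x))
        (fun v _ => rfl) 0 [[1920, 0]]]
  have h0 : (0 : Int) = ((0 : Nat) : Int) := rfl
  rw [h0, pvOuter_spec (PySem.List.sorted liste (fun x => x))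
        (PySem.List.sorted liste (fun x => x)).length 0 (by omega) (Nat.zero_le _) [[1920, ((0 : Nat) : Int)]]]
  simp
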